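-- pv_equiv track=rewrite | github.com/paiml/depyler | examples/hard_bell_numbers.py | bell_triangle_row
-- ===== SOURCE A (Python) =====
-- def bell_triangle_row(n: int) -> list[int]:
--     # Return the nth row of Bell triangle
--     if n == 0:
--         return [1]
--     prev_row: list[int] = [1]
--     row_idx: int = 1
--     while row_idx <= n:
--         curr_row: list[int] = [prev_row[len(prev_row) - 1]]
--         j: int = 1
--         while j <= row_idx:
--             curr_row.append(curr_row[j - 1] + prev_row[j - 1])
--             j = j + 1
--         prev_row = curr_row
--         row_idx = row_idx + 1
--     return prev_row
-- ===== SOURCE B (Python) =====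
-- def bell_triangle_row(n: int) -> list[int]:
--     # nth Bell-triangle row, recursively: each row is a running prefix sum
--     # seeded with the last element of the previous row.
--     if n <= 0:
--         return [1]
--     prev = bell_triangle_row(n - 1)
--     acc = prev[-1]
--     row = [acc]
--     for x in prev:
--         acc += x
--         row.append(acc)
--     return row
-- ===== Notes on version B (the rewrite author's own statement) =====
-- stated objective: alternative
-- what changed: Replaces the iterative double-while with index arithmetic (curr[j-1]+prev[j-1]) by recursion on n, building each row as a single running prefix sum over the previous row seeded with its last element.
import Mathlib
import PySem

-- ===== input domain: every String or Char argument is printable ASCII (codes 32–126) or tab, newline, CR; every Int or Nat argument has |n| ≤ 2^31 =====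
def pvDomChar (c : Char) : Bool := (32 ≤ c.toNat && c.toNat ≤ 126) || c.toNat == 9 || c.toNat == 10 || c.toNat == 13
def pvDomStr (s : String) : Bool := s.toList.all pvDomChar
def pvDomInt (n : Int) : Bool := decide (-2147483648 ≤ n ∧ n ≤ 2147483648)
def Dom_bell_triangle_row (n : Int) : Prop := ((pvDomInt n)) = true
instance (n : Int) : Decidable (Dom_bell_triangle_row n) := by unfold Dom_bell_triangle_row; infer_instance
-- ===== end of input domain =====

-- B rewrites A's double while loop (index arithmetic curr[j-1]+prev[j-1]) as recursion on n
-- with each row built by one running prefix sum; objective: alternative decomposition.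

-- ===== PORT A =====
-- inner while loop: 'while j <= row_idx: curr.append(curr[j-1] + prev[j-1]); j += 1'
-- (indices j-1 are always in range here, so pyGet? … |>.getD 0 is exact)
def pvAInner (rowIdx j : Int) (curr prev : List Int) : List Int :=
  if j ≤ rowIdx then
    pvAInner rowIdx (j + 1)
      (curr ++ [(PySem.List.pyGet? curr (j - 1)).getD 0 + (PySem.List.pyGet? prev (j - 1)).getD 0])
      prev
  else curr
termination_by (rowIdx + 1 - j).toNat
decreasing_by omega

-- outer while loop: 'while row_idx <= n: curr = [prev[len(prev)-1]]; <inner>; prev = curr; row_idx += 1'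
def pvAOuter (n rowIdx : Int) (prev : List Int) : List Int :=
  if rowIdx ≤ n then
    pvAOuter n (rowIdx + 1)
      (pvAInner rowIdx 1 [(PySem.List.pyGet? prev ((prev.length : Int) - 1)).getD 0] prev)
  else prev
termination_by (n + 1 - rowIdx).toNat
decreasing_by omega

def bell_triangle_row (n : Int) : List Int :=
  if n = 0 then [1] else pvAOuter n 1 [1]

-- ===== PORT B =====
-- 'for x in prev: acc += x; row.append(acc)' as structural recursion over prev
def pvPrefix (acc : Int) : List Int → List Int
  | [] => []
  | x :: rest => (acc + x) :: pvPrefix (acc + x) rest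

def bell_triangle_row_alt (n : Int) : List Int :=
  if n ≤ 0 then [1]
  else
    let prev := bell_triangle_row_alt (n - 1)
    let acc := (PySem.List.pyGet? prev (-1)).getD 0
    acc :: pvPrefix acc prev
termination_by n.toNat
decreasing_by omega

-- ===== PRECONDITION & SPEC =====
def Spec_bell_triangle_row (n : Int) (out : List Int) : Prop := out = bell_triangle_row_alt n
instance (n : Int) (out : List Int) : Decidable (Spec_bell_triangle_row n out) := by unfold Spec_bell_triangle_row; infer_instance

-- ===== CLAIM (what is proved, stated in full; the proofs are below) =====
def Claim_equal_bell_triangle_row : Prop := ∀ (n : Int), Dom_bell_triangle_row n → Spec_bell_triangle_row n (bell_triangle_row n)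

-- ===== LEMMAS AND PROOFS =====

-- B's row step, as a function of the previous row
def pvStep (prev : List Int) : List Int :=
  let acc := (PySem.List.pyGet? prev (-1)).getD 0
  acc :: pvPrefix acc prev

def pvIter : Nat → List Int → List Int
  | 0, p => p
  | k + 1, p => pvIter k (pvStep p)

lemma pvPrefix_length (acc : Int) (xs : List Int) : (pvPrefix acc xs).length = xs.length := by
  induction xs generalizing acc with
  | nil => rfl
  | cons x rest ih => simp [pvPrefix, ih]

lemma pvStep_length (p : List Int) : (pvStep p).length = p.length + 1 := by
  simp [pvStep, pvPrefix_length]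

lemma pvIter_succ (k : Nat) (p : List Int) : pvIter (k + 1) p = pvStep (pvIter k p) := by
  induction k generalizing p with
  | zero => rfl
  | succ m ih => simpa [pvIter] using ih (pvStep p)

lemma pvAInner_eq (rest : List Int) : ∀ (front curr : List Int), curr ≠ [] →
    curr.length = front.length + 1 →
    pvAInner ((front ++ rest).length : Int) ((front.length : Int) + 1) curr (front ++ rest)
      = curr ++ pvPrefix (curr.getLast?.getD 0) rest := by
  induction rest with
  | nil =>
    intro front curr _ _
    rw [pvAInner, if_neg (by simp only [List.append_nil]; omega)]
    simp [pvPrefix]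
  | cons r rs ih =>
    intro front curr hne hlen
    rw [pvAInner]
    have hcond : (front.length : Int) + 1 ≤ ((front ++ (r :: rs)).length : Int) := by
      simp
    rw [if_pos hcond]
    have hgcurr : (PySem.List.pyGet? curr ((front.length : Int) + 1 - 1)).getD 0
        = curr.getLast?.getD 0 := by
      have h1 : ((front.length : Int) + 1 - 1) = ((front.length : Int)) := by ring
      rw [h1, PySem.List.pyGet?_natCast]
      rcases List.eq_nil_or_concat curr with h | ⟨ys, y, rfl⟩
      · exact absurd h hne
      · simp at hlen
        simp [hlen]
    have hgprev : (PySem.List.pyGet? (front ++ r :: rs) ((front.length : Int) + 1 - 1)).getD 0 = r := by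
      have h1 : ((front.length : Int) + 1 - 1) = ((front.length : Int)) := by ring
      rw [h1, PySem.List.pyGet?_append_length]
      rfl
    rw [hgcurr, hgprev]
    have hne' : curr ++ [curr.getLast?.getD 0 + r] ≠ [] := by simp
    have hlen' : (curr ++ [curr.getLast?.getD 0 + r]).length = (front ++ [r]).length + 1 := by
      simp [hlen]
    have hcast : ((front.length : Int) + 1) = (((front ++ [r]).length : Int)) := by simp
    have happ : front ++ r :: rs = (front ++ [r]) ++ rs := by simp
    have hlen2 : ((front ++ r :: rs).length : Int) = (((front ++ [r]) ++ rs).length : Int) := by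
      rw [happ]
    rw [hcast, hlen2, happ] at *
    rw [ih (front ++ [r]) _ hne' hlen']
    simp [pvPrefix]

lemma pvAInner_step (prev : List Int) (hne : prev ≠ []) :
    pvAInner (prev.length : Int) 1
      [(PySem.List.pyGet? prev ((prev.length : Int) - 1)).getD 0] prev = pvStep prev := by
  have h := pvAInner_eq prev []
      [(PySem.List.pyGet? prev ((prev.length : Int) - 1)).getD 0] (by simp) (by simp)
  simp only [List.nil_append, List.length_nil, Nat.cast_zero, zero_add] at h
  rw [h]
  have hget : (PySem.List.pyGet? prev ((prev.length : Int) - 1)).getD 0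
      = (PySem.List.pyGet? prev (-1)).getD 0 := by
    rw [PySem.List.pyGet?_neg_one]
    rcases List.eq_nil_or_concat prev with h | ⟨ys, y, rfl⟩
    · exact absurd h hne
    · simp only [List.concat_eq_append] at *
      have : ((ys ++ [y]).length : Int) - 1 = ((ys.length : Nat) : Int) := by simp
      rw [this, PySem.List.pyGet?_natCast]
      simp
  rw [hget]
  simp [pvStep]

lemma pvAOuter_eq (n : Int) : ∀ (m : Nat) (rowIdx : Int) (prev : List Int),
    1 ≤ rowIdx → prev.length = rowIdx.toNat → prev ≠ [] →
    (n + 1 - rowIdx).toNat = m → pvAOuter n rowIdx prev = pvIter m prev := by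
  intro m
  induction m with
  | zero =>
    intro rowIdx prev _ _ _ hm
    rw [pvAOuter, if_neg (by omega)]
    rfl
  | succ k ih =>
    intro rowIdx prev h1 hlen hne hm
    rw [pvAOuter, if_pos (by omega)]
    have hcast : (prev.length : Int) = rowIdx := by omega
    rw [← hcast, pvAInner_step prev hne, hcast]
    rw [ih (rowIdx + 1) (pvStep prev) (by omega)
      (by rw [pvStep_length]; omega)
      (by simp [pvStep]) (by omega)]
    rfl

lemma alt_eq_iter : ∀ (k : Nat) (n : Int), n.toNat = k → bell_triangle_row_alt n = pvIter k [1] := by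
  intro k
  induction k with
  | zero =>
    intro n hn
    rw [bell_triangle_row_alt, if_pos (by omega)]
    rfl
  | succ m ih =>
    intro n hn
    rw [bell_triangle_row_alt, if_neg (by omega)]
    rw [ih (n - 1) (by omega), pvIter_succ]
    rfl

-- ===== VERDICT (by name: the statement is the Claim_ definition above) =====
theorem bell_triangle_row_spec : Claim_equal_bell_triangle_row := by
  intro n _
  unfold Spec_bell_triangle_row
  unfold bell_triangle_row
  by_cases h0 : n = 0
  · subst h0
    rw [if_pos rfl, alt_eq_iter 0 0 rfl]
    rfl
  · rw [if_neg h0]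
    by_cases hneg : n < 0
    · rw [pvAOuter_eq n 0 1 [1] (by omega) (by simp) (by simp) (by omega)]
      rw [alt_eq_iter 0 n (by omega)]
    · rw [pvAOuter_eq n n.toNat 1 [1] (by omega) (by simp) (by simp) (by omega)]
      rw [alt_eq_iter n.toNat n rfl]
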